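-- pv_equiv track=rewrite | github.com/ahendriksen/raft | cpp/scripts/analyze-ninja-log.py | discard_earlier_builds
-- ===== SOURCE A (Python) =====
-- def discard_earlier_builds(d):
--     prev_end = 0
--     start_index = 0
--     # end must be monotonically increasing. If we find and end value that is
--     # lower than the end value on the previous row, we know that a new build has
--     # started.
--     for i, end in enumerate(d['end']):
--         if end < prev_end:
--             start_index = i
--         prev_end = end
--
--     return {k: v[start_index:] for k, v in d.items()}
-- ===== SOURCE B (Python) =====
-- def discard_earlier_builds(d):
--     # Scan backwards from the last row and stop at the first place where
--     # 'end' decreases; that index is the start of the most recent build.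
--     ends = d['end']
--     i = len(ends) - 1
--     while i > 0 and ends[i - 1] <= ends[i]:
--         i -= 1
--     start_index = max(i, 0)
--     return {k: v[start_index:] for k, v in d.items()}
-- ===== Notes on version B (the rewrite author's own statement) =====
-- stated objective: alternative
-- what changed: Replaces A's full forward scan carrying prev_end/start_index state by a backward scan from the last row that stops early at the first decrease of 'end' (a while loop with early exit instead of a stateful for loop over the whole column).
import Mathlib
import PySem

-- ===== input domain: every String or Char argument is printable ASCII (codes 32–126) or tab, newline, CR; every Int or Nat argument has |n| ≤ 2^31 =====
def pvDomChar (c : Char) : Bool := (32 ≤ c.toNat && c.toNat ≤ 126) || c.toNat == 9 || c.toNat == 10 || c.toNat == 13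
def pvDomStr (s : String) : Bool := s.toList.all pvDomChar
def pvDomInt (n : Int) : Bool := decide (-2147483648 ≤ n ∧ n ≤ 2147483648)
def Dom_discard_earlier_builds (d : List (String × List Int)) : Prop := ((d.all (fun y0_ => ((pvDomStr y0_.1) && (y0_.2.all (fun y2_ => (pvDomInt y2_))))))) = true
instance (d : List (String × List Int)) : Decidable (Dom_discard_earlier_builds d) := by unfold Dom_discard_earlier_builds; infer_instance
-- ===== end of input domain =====

-- B replaces A's stateful forward scan (prev_end/start_index) by a backward while
-- loop from the last row that stops at the first decrease of 'end'; objective: alternative.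


-- ===== PORT A =====
-- d['end'] is a first-match lookup (dict as assoc list); Pre_ guarantees the key exists
-- (Python raises KeyError otherwise), so the .getD [] default is never reached.
def discard_earlier_builds (d : List (String × List Int)) : List (String × List Int) :=
  let ends := (d.lookup "end").getD []
  -- for i, end in enumerate(ends): state = (prev_end, start_index)
  let st := (PySem.List.enumerate ends 0).foldl
      (fun (s : Int × Int) (p : Int × Int) => (p.2, if p.2 < s.1 then p.1 else s.2)) (0, 0)
  d.map (fun kv => (kv.1, PySem.List.slice kv.2 (some st.2) none))

-- ===== PORT B =====
-- while i > 0 and ends[i-1] <= ends[i]: i -= 1   — structural recursion on i.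
-- (the indices i-1, i are in bounds whenever this is called with i < ends.length,
-- so pyGetD's default 0 is never reached)
def backScan (ends : List Int) : Nat → Nat
  | 0 => 0
  | j + 1 =>
      if PySem.List.pyGetD ends (j : Int) 0 ≤ PySem.List.pyGetD ends ((j : Int) + 1) 0
      then backScan ends j else j + 1

def discard_earlier_builds_alt (d : List (String × List Int)) : List (String × List Int) :=
  let ends := (d.lookup "end").getD []
  -- i = len(ends) - 1; backward loop; start_index = max(i, 0): Python's i is -1 only
  -- for empty ends, where Nat truncated subtraction already yields 0, so max is subsumed.
  let st : Int := (backScan ends (ends.length - 1) : Int)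
  d.map (fun kv => (kv.1, PySem.List.slice kv.2 (some st) none))

-- ===== PRECONDITION & SPEC =====
-- Pre_ excludes exactly the inputs with no key "end", on which A raises KeyError.
def Pre_discard_earlier_builds (d : List (String × List Int)) : Prop :=
  "end" ∈ d.map Prod.fst
instance (d : List (String × List Int)) : Decidable (Pre_discard_earlier_builds d) := by unfold Pre_discard_earlier_builds; infer_instance

def pvWitness_discard_earlier_builds : (List (String × List Int)) := [("end", [1, 2, 0, 3])]

def Spec_discard_earlier_builds (d : List (String × List Int)) (out : List (String × List Int)) : Prop := out = discard_earlier_builds_alt d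
instance (d : List (String × List Int)) (out : List (String × List Int)) : Decidable (Spec_discard_earlier_builds d out) := by unfold Spec_discard_earlier_builds; infer_instance

-- ===== CLAIM (what is proved, stated in full; the proofs are below) =====
def Claim_equal_discard_earlier_builds : Prop := ∀ (d : List (String × List Int)), Dom_discard_earlier_builds d → Pre_discard_earlier_builds d → Spec_discard_earlier_builds d (discard_earlier_builds d)

-- ===== LEMMAS AND PROOFS =====

-- fst of A's fold state is the last element processed (or the initial prev_end).
theorem fold_fst_eq_getLast (l : List Int) (s : Int) (init : Int × Int) :
    ((PySem.List.enumerate l s).foldl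
      (fun (s : Int × Int) (p : Int × Int) => (p.2, if p.2 < s.1 then p.1 else s.2)) init).1
    = l.getLast?.getD init.1 := by
  induction l using List.reverseRecOn generalizing s init with
  | nil => simp [PySem.List.enumerate]
  | append_singleton l x ih =>
      simp [PySem.List.enumerate_append, PySem.List.enumerate_cons, PySem.List.enumerate_nil]

-- backScan only reads indices ≤ i, so it is unchanged by appending past them.
theorem backScan_append (l : List Int) (x : Int) (i : Nat) (hi : i < l.length) :
    backScan (l ++ [x]) i = backScan l i := by
  induction i with
  | zero => rfl
  | succ j ih =>
      have h1 : PySem.List.pyGetD (l ++ [x]) (j : Int) 0 = PySem.List.pyGetD l (j : Int) 0 := by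
        rw [PySem.List.pyGetD_eq_getElem _ _ (by omega) (by simp; omega),
            PySem.List.pyGetD_eq_getElem _ _ (by omega) (by omega)]
        exact List.getElem_append_left (by omega)
      have h2 : PySem.List.pyGetD (l ++ [x]) ((j : Int) + 1) 0
          = PySem.List.pyGetD l ((j : Int) + 1) 0 := by
        rw [PySem.List.pyGetD_eq_getElem _ _ (by omega) (by simp; omega),
            PySem.List.pyGetD_eq_getElem _ _ (by omega) (by omega)]
        exact List.getElem_append_left (by omega)
      simp only [backScan, h1, h2]
      split
      · exact ih (by omega)
      · rfl

-- A's resulting start_index equals B's backward-scan result.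
theorem scan_eq_back (l : List Int) :
    ((PySem.List.enumerate l 0).foldl
      (fun (s : Int × Int) (p : Int × Int) => (p.2, if p.2 < s.1 then p.1 else s.2)) (0, 0)).2
    = ((backScan l (l.length - 1) : Nat) : Int) := by
  induction l using List.reverseRecOn with
  | nil => simp [PySem.List.enumerate, backScan]
  | append_singleton l x ih =>
      rw [PySem.List.enumerate_append, List.foldl_append]
      simp only [PySem.List.enumerate_cons, PySem.List.enumerate_nil, List.foldl_cons,
        List.foldl_nil]
      by_cases hl : l = []
      · subst hl
        simp [PySem.List.enumerate, backScan]
      · have hpos : 0 < l.length := List.length_pos_of_ne_nil hl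
        obtain ⟨j, hj⟩ : ∃ j, l.length = j + 1 := ⟨l.length - 1, by omega⟩
        have hlen : (l ++ [x]).length - 1 = j + 1 := by simp [hj]
        have hfst : ((PySem.List.enumerate l 0).foldl
            (fun (s : Int × Int) (p : Int × Int) => (p.2, if p.2 < s.1 then p.1 else s.2)) (0, 0)).1
            = l.getLast hl := by
          rw [fold_fst_eq_getLast]
          simp [List.getLast?_eq_some_getLast hl]
        have hget1 : PySem.List.pyGetD (l ++ [x]) ((j : Int) + 1) 0 = x := by
          have hcast : ((j : Int) + 1) = ((l.length : Nat) : Int) := by omega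
          rw [hcast, PySem.List.pyGetD_natCast]
          simp
        have hget2 : PySem.List.pyGetD (l ++ [x]) (j : Int) 0 = l.getLast hl := by
          rw [PySem.List.pyGetD_eq_getElem _ _ (by omega) (by simp; omega)]
          rw [List.getElem_append_left (by omega)]
          rw [List.getLast_eq_getElem]
          congr 1
          omega
        rw [hlen]
        simp only [backScan, hget1, hget2, hfst]
        by_cases hx : x < l.getLast hl
        · have : ¬ l.getLast hl ≤ x := by omega
          simp [hx, this, hj]
        · have hle : l.getLast hl ≤ x := by omega
          rw [backScan_append l x j (by omega)]
          simp [hx, hle, ih, hj]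

-- ===== VERDICT (by name: the statement is the Claim_ definition above) =====
theorem discard_earlier_builds_spec : Claim_equal_discard_earlier_builds := by
  intro d _ _
  show discard_earlier_builds d = discard_earlier_builds_alt d
  simp only [discard_earlier_builds, discard_earlier_builds_alt, scan_eq_back]
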